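-- pv_equiv track=rewrite | github.com/rabumaabraham/DSA-UC-San-Diego | stock_charts.py | min_charts
-- ===== SOURCE A (Python) =====
-- def min_charts(stock_data):
--     # This problem reduces to minimum path cover in DAG
--     # Minimum path cover = n - maximum matching in bipartite graph
--     n = len(stock_data)
--     if n <= 1:
--         return n
--
--     # Create bipartite graph where we can match stocks
--     # that can be placed on the same chart
--     def can_place_together(stock1, stock2):
--         # Check if stock1 can be placed completely below stock2
--         return all(stock1[i] < stock2[i] for i in range(len(stock1)))
--
--     # Find maximum matching in bipartite graph
--     def max_matching():
--         # match[i] = j means stock i is matched to stock j (in right partition)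
--         match = [-1] * n
--
--         def dfs(u, visited):
--             for v in range(n):
--                 if v not in visited and can_place_together(stock_data[u], stock_data[v]):
--                     visited.add(v)
--                     if match[v] == -1 or dfs(match[v], visited):
--                         match[v] = u
--                         return True
--             return False
--
--         result = 0
--         for u in range(n):
--             if dfs(u, set()):
--                 result += 1
--
--         return result
--
--     # Minimum path cover = n - maximum matching
--     return n - max_matching()
-- ===== SOURCE B (Python) =====
-- def min_charts(stock_data):
--     # Explicit-stack augmenting search over a precomputed compatibility matrix:
--     # the augmenting path is collected on the stack and applied in one sweep,
--     # instead of A's recursive DFS that re-tests compatibility and assigns on unwind.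
--     n = len(stock_data)
--     if n <= 1:
--         return n
--
--     adj = [[all(a < b for a, b in zip(s, t)) for t in stock_data]
--            for s in stock_data]
--
--     match_ = [-1] * n
--
--     def try_augment(u):
--         visited = set()
--         stack = [(u, 0)]          # (left vertex, next right candidate); top = end
--         while stack:
--             w, v = stack[-1]
--             if v >= n:
--                 stack.pop()
--                 if stack:
--                     pw, pv = stack[-1]
--                     stack[-1] = (pw, pv + 1)
--                 continue
--             if v in visited or not adj[w][v]:
--                 stack[-1] = (w, v + 1)
--                 continue
--             visited.add(v)
--             if match_[v] == -1:
--                 match_[v] = w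
--                 for pw, pv in reversed(stack[:-1]):
--                     match_[pv] = pw
--                 return True
--             stack.append((match_[v], 0))
--         return False
--
--     result = 0
--     for u in range(n):
--         if try_augment(u):
--             result += 1
--     return n - result
-- ===== Notes on version B (the rewrite author's own statement) =====
-- stated objective: alternative
-- what changed: B replaces A's recursive Kuhn DFS (which re-evaluates can_place_together on the fly and assigns match[] while unwinding) by an explicit-stack augmenting search over a compatibility matrix precomputed once, collecting the augmenting path on the stack and applying all match[] assignments in a single sweep at the moment of success.
-- outside the precondition, e.g. on min_charts([[0, 0], [1, 1], [1]]): A returns 2, B returns 2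
import Mathlib
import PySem

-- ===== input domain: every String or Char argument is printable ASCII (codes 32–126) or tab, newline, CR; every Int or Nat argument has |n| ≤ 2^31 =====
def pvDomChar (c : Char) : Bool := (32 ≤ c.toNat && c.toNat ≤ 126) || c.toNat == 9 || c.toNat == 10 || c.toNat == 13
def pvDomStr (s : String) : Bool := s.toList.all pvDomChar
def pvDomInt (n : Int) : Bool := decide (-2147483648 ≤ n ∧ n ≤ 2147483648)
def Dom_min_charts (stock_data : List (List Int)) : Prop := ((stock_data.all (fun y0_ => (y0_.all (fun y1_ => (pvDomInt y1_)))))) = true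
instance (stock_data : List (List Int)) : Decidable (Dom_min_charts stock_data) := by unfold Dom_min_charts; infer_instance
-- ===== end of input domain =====

-- B re-implements the augmenting search with an explicit stack over a precomputed
-- compatibility matrix, applying the augmenting path in one sweep (objective: alternative).

-- ===== PORT A =====

-- can_place_together: all(stock1[i] < stock2[i] for i in range(len(stock1)))
-- (pyGet? none = Python IndexError; the `false` in that arm is junk outside Pre_)
def cpA (s t : List Int) : Bool :=
  (PySem.List.pyRange 0 s.length 1).all (fun i =>
    match PySem.List.pyGet? s i, PySem.List.pyGet? t i with
    | some a, some b => decide (a < b)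
    | _, _ => false)

-- stock_data[i] (i always in range on real runs)
def dataGetA (data : List (List Int)) (i : Int) : List Int :=
  (PySem.List.pyGet? data i).getD []

def edgeA (data : List (List Int)) (u : Int) (v : Nat) : Bool :=
  cpA (dataGetA data u) (dataGetA data (v : Int))

-- dfs(u, visited) of A: the recursive DFS, transliterated with a fuel counter
-- as totality device (one unit per call; the fuel supplied below provably never
-- runs out, see goAF_eq): loop over v = 0..n-1, visited.add before the match
-- test, match assignment on the unwind.  The `vis.length < data.length` test is
-- a totality guard, unreachable because visited always holds fewer than n
-- distinct rights before a fresh add.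
def goAF (data : List (List Int)) : Nat → Int → Nat → PySem.Set Nat → List Int →
    Bool × PySem.Set Nat × List Int
  | 0, _, _, vis, mt => (false, vis, mt)
  | fuel + 1, u, v, vis, mt =>
    if data.length ≤ v then (false, vis, mt)
    else if (!PySem.Set.contains vis v && edgeA data u v) then
      if vis.length < data.length then
        if mt.getD v (-1) = -1 then (true, PySem.Set.add vis v, mt.set v u)
        else
          let r := goAF data fuel (mt.getD v (-1)) 0 (PySem.Set.add vis v) mt
          if r.1 then (true, r.2.1, r.2.2.set v u)
          else goAF data fuel u (v + 1) r.2.1 r.2.2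
      else (false, vis, mt)
    else goAF data fuel u (v + 1) vis mt

def min_charts (stock_data : List (List Int)) : Int :=
  let n := stock_data.length
  if n ≤ 1 then (n : Int)
  else
    let fin := (PySem.List.pyRange 0 (n : Int) 1).foldl
      (fun (st : List Int × Int) (u : Int) =>
        let r := goAF stock_data ((n + 1) * (n + 3)) u 0 PySem.Set.empty st.1
        (r.2.2, if r.1 then st.2 + 1 else st.2))
      (List.replicate n (-1), 0)
    (n : Int) - fin.2

-- ===== PORT B =====

-- all(a < b for a, b in zip(s, t))
def cpB (s t : List Int) : Bool :=
  (s.zip t).all (fun p => decide (p.1 < p.2))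

def adjB (data : List (List Int)) : List (List Bool) :=
  data.map (fun s => data.map (fun t => cpB s t))

-- adj[w][v]; the `.getD` defaults are junk only where Python would raise
def lookB (adj : List (List Bool)) (w : Int) (v : Nat) : Bool :=
  (PySem.List.pyGet? ((PySem.List.pyGet? adj w).getD []) (v : Int)).getD true

-- the while-loop of try_augment, with a fuel counter as totality device (one
-- unit per iteration; the fuel supplied below provably never runs out, see
-- runBF_eq); list head = top of the Python stack.  The `vis.length < n` test is
-- the same totality guard as in A's port (unreachable); it abandons the current
-- frame, as a failed Python frame would be.
def runBF (n : Nat) (adj : List (List Bool)) : Nat → List (Int × Nat) →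
    PySem.Set Nat → List Int → Bool × PySem.Set Nat × List Int
  | _, [], vis, mt => (false, vis, mt)
  | 0, _ :: _, vis, mt => (false, vis, mt)
  | fuel + 1, (w, v) :: rest, vis, mt =>
    if n ≤ v then
      match rest with
      | [] => (false, vis, mt)
      | (pw, pv) :: rest' => runBF n adj fuel ((pw, pv + 1) :: rest') vis mt
    else if (PySem.Set.contains vis v || !lookB adj w v) then
      runBF n adj fuel ((w, v + 1) :: rest) vis mt
    else if vis.length < n then
      if mt.getD v (-1) = -1 then
        (true, PySem.Set.add vis v, ((w, v) :: rest).foldl (fun m p => m.set p.2 p.1) mt)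
      else runBF n adj fuel ((mt.getD v (-1), 0) :: (w, v) :: rest) (PySem.Set.add vis v) mt
    else runBF n adj fuel ((w, n) :: rest) vis mt

def min_charts_alt (stock_data : List (List Int)) : Int :=
  let n := stock_data.length
  if n ≤ 1 then (n : Int)
  else
    let adj := adjB stock_data
    let fin := (PySem.List.pyRange 0 (n : Int) 1).foldl
      (fun (st : List Int × Int) (u : Int) =>
        let r := runBF n adj ((n + 2) * (n + 3)) [(u, 0)] PySem.Set.empty st.1
        (r.2.2, if r.1 then st.2 + 1 else st.2))
      (List.replicate n (-1), 0)
    (n : Int) - fin.2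

-- ===== PRECONDITION & SPEC =====
-- Pre_ excludes inputs containing a pair of rows where the first is strictly longer
-- than the second and pointwise below it along the second's whole length: on such
-- pairs A's can_place_together raises IndexError whenever the search evaluates them
-- (and when the search happens to skip them, A's returning at all is an accident of
-- the augmenting-search order).
def Pre_min_charts (stock_data : List (List Int)) : Prop :=
  ∀ s ∈ stock_data, ∀ t ∈ stock_data, t.length < s.length →
    ∃ i < t.length, ¬ (s.getD i 0 < t.getD i 0)
instance (stock_data : List (List Int)) : Decidable (Pre_min_charts stock_data) := by
  unfold Pre_min_charts; infer_instance

def pvWitness_min_charts : List (List Int) := [[1, 2], [3, 4], [2, 0]]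

def Spec_min_charts (stock_data : List (List Int)) (out : Int) : Prop := out = min_charts_alt stock_data
instance (stock_data : List (List Int)) (out : Int) : Decidable (Spec_min_charts stock_data out) := by unfold Spec_min_charts; infer_instance

-- ===== CLAIM (what is proved, stated in full; the proofs are below) =====
def Claim_equal_min_charts : Prop := ∀ (stock_data : List (List Int)), Dom_min_charts stock_data → Pre_min_charts stock_data → Spec_min_charts stock_data (min_charts stock_data)

-- ===== LEMMAS AND PROOFS =====

-- proof-only well-founded twins of the two fuelled loops (the fuel-sufficiency
-- lemmas goAF_eq / runBF_eq identify the ports with them)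
theorem pvSetAddLen {v : Nat} (vis : PySem.Set Nat) (h : v ∉ vis) :
    (PySem.Set.add vis v).length = vis.length + 1 := by
  rw [PySem.Set.add_of_not_mem h]; simp

theorem pvSetAddLenLe {v : Nat} (vis : PySem.Set Nat) :
    vis.length ≤ (PySem.Set.add vis v).length := by
  unfold PySem.Set.add; split
  · exact le_rfl
  · simp

def goA (data : List (List Int)) (u : Int) (v : Nat) (vis : PySem.Set Nat) (mt : List Int) :
    {r : Bool × PySem.Set Nat × List Int // vis.length ≤ r.2.1.length} :=
  if hv : data.length ≤ v then ⟨(false, vis, mt), le_rfl⟩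
  else if hc : (!PySem.Set.contains vis v && edgeA data u v) = true then
    if hL : vis.length < data.length then
      if mt.getD v (-1) = -1 then
        ⟨(true, PySem.Set.add vis v, mt.set v u), pvSetAddLenLe vis⟩
      else
        match goA data (mt.getD v (-1)) 0 (PySem.Set.add vis v) mt with
        | ⟨(true, vis2, mt2), hprf⟩ =>
          ⟨(true, vis2, mt2.set v u), le_trans (pvSetAddLenLe vis) hprf⟩
        | ⟨(false, vis2, mt2), hprf⟩ =>
          match goA data u (v + 1) vis2 mt2 with
          | ⟨r2, hprf2⟩ => ⟨r2, le_trans (le_trans (pvSetAddLenLe vis) hprf) hprf2⟩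
    else ⟨(false, vis, mt), le_rfl⟩
  else goA data u (v + 1) vis mt
termination_by (data.length + 1 - vis.length, data.length - v)
decreasing_by
  · have hnm : v ∉ vis ∧ edgeA data u v = true := by simpa using hc
    have h1 := pvSetAddLen vis hnm.1
    exact Prod.Lex.left _ _ (by omega)
  · have hnm : v ∉ vis ∧ edgeA data u v = true := by simpa using hc
    have h1 := pvSetAddLen vis hnm.1
    have h2 : (PySem.Set.add vis v).length ≤ vis2.length := by simpa using hprf
    exact Prod.Lex.left _ _ (by omega)
  · exact Prod.Lex.right _ (by omega)

def runB (n : Nat) (adj : List (List Bool)) (stack : List (Int × Nat))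
    (vis : PySem.Set Nat) (mt : List Int) : Bool × PySem.Set Nat × List Int :=
  match stack with
  | [] => (false, vis, mt)
  | (w, v) :: rest =>
    if hnv : n ≤ v then
      match rest with
      | [] => (false, vis, mt)
      | (pw, pv) :: rest' => runB n adj ((pw, pv + 1) :: rest') vis mt
    else if hsk : (PySem.Set.contains vis v || !lookB adj w v) = true then
      runB n adj ((w, v + 1) :: rest) vis mt
    else if hL : vis.length < n then
      if mt.getD v (-1) = -1 then
        (true, PySem.Set.add vis v, ((w, v) :: rest).foldl (fun m p => m.set p.2 p.1) mt)
      else runB n adj ((mt.getD v (-1), 0) :: (w, v) :: rest) (PySem.Set.add vis v) mt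
    else runB n adj ((w, n) :: rest) vis mt
termination_by (n + 1 - vis.length, (stack.map (fun p => n + 1 - p.2)).sum, stack.length)
decreasing_by
  · simp only [List.map_cons, List.sum_cons, List.length_cons]
    by_cases hlt : (n + 1 - (pv + 1)) + ((rest'.map (fun p => n + 1 - p.2)).sum) <
        (n + 1 - v) + ((n + 1 - pv) + ((rest'.map (fun p => n + 1 - p.2)).sum))
    · exact Prod.Lex.right _ (Prod.Lex.left _ _ hlt)
    · have heq : (n + 1 - (pv + 1)) + ((rest'.map (fun p => n + 1 - p.2)).sum) =
          (n + 1 - v) + ((n + 1 - pv) + ((rest'.map (fun p => n + 1 - p.2)).sum)) := by omega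
      rw [heq]
      exact Prod.Lex.right _ (Prod.Lex.right _ (by omega))
  · simp only [List.map_cons, List.sum_cons]
    exact Prod.Lex.right _ (Prod.Lex.left _ _ (by omega))
  · have hnm : v ∉ vis := by
      have := hsk; simp at this; exact this.1
    have h1 := pvSetAddLen vis hnm
    exact Prod.Lex.left _ _ (by omega)
  · simp only [List.map_cons, List.sum_cons]
    exact Prod.Lex.right _ (Prod.Lex.left _ _ (by omega))

theorem runB_nil (n : Nat) (adj : List (List Bool)) (vis : PySem.Set Nat) (mt : List Int) :
    runB n adj [] vis mt = (false, vis, mt) := by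
  rw [runB.eq_def]


-- the continuation a stack `rest` represents: on success apply the collected
-- assignments, on failure resume the parent frame (proof-only helper)
def contA (data : List (List Int)) (rest : List (Int × Nat))
    (r : Bool × PySem.Set Nat × List Int) : Bool × PySem.Set Nat × List Int :=
  if r.1 then (true, r.2.1, rest.foldl (fun m p => m.set p.2 p.1) r.2.2)
  else match rest with
    | [] => (false, r.2.1, r.2.2)
    | (pw, pv) :: rest' => runB data.length (adjB data) ((pw, pv + 1) :: rest') r.2.1 r.2.2

theorem pyGet?_map {α β : Type} (f : α → β) (xs : List α) (i : Int) :
    PySem.List.pyGet? (xs.map f) i = (PySem.List.pyGet? xs i).map f := by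
  simp [PySem.List.pyGet?, PySem.List.pyIdx?]

-- can_place_together of A agrees with B's zip form on every admitted pair
theorem cp_eq (s t : List Int)
    (h : t.length < s.length → ∃ i < t.length, ¬ (s.getD i 0 < t.getD i 0)) :
    cpA s t = cpB s t := by
  by_cases hfail : ∃ j, j < min s.length t.length ∧ ¬ (s.getD j 0 < t.getD j 0)
  · obtain ⟨j, hj, hnot⟩ := hfail
    have hjs : j < s.length := lt_of_lt_of_le hj (Nat.min_le_left _ _)
    have hjt : j < t.length := lt_of_lt_of_le hj (Nat.min_le_right _ _)
    rw [List.getD_eq_getElem s 0 hjs, List.getD_eq_getElem t 0 hjt] at hnot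
    have hA : cpA s t = false := by
      unfold cpA
      rw [List.all_eq_false]
      refine ⟨(j : Int), ?_, ?_⟩
      · rw [PySem.List.mem_pyRange_one]
        exact ⟨Int.natCast_nonneg j, by exact_mod_cast hjs⟩
      · simp [PySem.List.pyGet?_natCast, List.getElem?_eq_getElem hjs,
          List.getElem?_eq_getElem hjt, hnot]
    have hB : cpB s t = false := by
      unfold cpB
      rw [List.all_eq_false]
      have hjz : j < (s.zip t).length := by simp [List.length_zip]; omega
      refine ⟨(s.zip t)[j], List.getElem_mem hjz, ?_⟩
      rw [List.getElem_zip]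
      simpa using hnot
    rw [hA, hB]
  · push_neg at hfail
    have hle : s.length ≤ t.length := by
      by_contra hgt
      push_neg at hgt
      obtain ⟨i, hi, hno⟩ := h hgt
      exact hno (hfail i (by omega))
    have hA : cpA s t = true := by
      unfold cpA
      rw [List.all_eq_true]
      intro x hx
      rw [PySem.List.mem_pyRange_one] at hx
      obtain ⟨hx0, hxs⟩ := hx
      obtain ⟨j, rfl⟩ := Int.eq_ofNat_of_zero_le hx0
      have hjs : j < s.length := by exact_mod_cast hxs
      have hjt : j < t.length := by omega
      have := hfail j (by omega)
      rw [List.getD_eq_getElem s 0 hjs, List.getD_eq_getElem t 0 hjt] at this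
      simp [PySem.List.pyGet?_natCast, List.getElem?_eq_getElem hjs,
        List.getElem?_eq_getElem hjt, this]
    have hB : cpB s t = true := by
      unfold cpB
      rw [List.all_eq_true]
      intro p hp
      obtain ⟨j, hjlt, hpj⟩ := List.getElem_of_mem hp
      have hj : j < min s.length t.length := by simpa [List.length_zip] using hjlt
      rw [← hpj, List.getElem_zip]
      have := hfail j hj
      rw [List.getD_eq_getElem s 0 (by omega), List.getD_eq_getElem t 0 (by omega)] at this
      simpa using this
    rw [hA, hB]

-- B's matrix lookup agrees with A's on-the-fly compatibility test
theorem look_eq (data : List (List Int)) (hpre : Pre_min_charts data)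
    (w : Int) (v : Nat) (hv : v < data.length) :
    lookB (adjB data) w v = edgeA data w v := by
  have hdv : PySem.List.pyGet? data (v : Int) = some data[v] := by
    rw [PySem.List.pyGet?_natCast]; exact List.getElem?_eq_getElem hv
  unfold lookB adjB edgeA dataGetA
  rw [pyGet?_map]
  cases hw : PySem.List.pyGet? data w with
  | none =>
    simp [PySem.List.pyGet?, PySem.List.pyIdx?, cpA, PySem.List.pyRange_one_eq_nil]
  | some s =>
    have hs : s ∈ data := PySem.List.mem_of_pyGet?_eq_some data hw
    have hcp := cp_eq s data[v] (fun hlen => hpre s hs data[v] (List.getElem_mem hv) hlen)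
    simp only [Option.map_some, Option.getD_some]
    rw [pyGet?_map, hdv]
    simp [hcp]

-- one-step value equations for goA
theorem goA_exit (data : List (List Int)) (u : Int) (v : Nat) (vis : PySem.Set Nat)
    (mt : List Int) (hv : data.length ≤ v) :
    (goA data u v vis mt).val = (false, vis, mt) := by
  rw [goA.eq_def, dif_pos hv]

theorem goA_skip (data : List (List Int)) (u : Int) (v : Nat) (vis : PySem.Set Nat)
    (mt : List Int) (hv : ¬ data.length ≤ v)
    (hc : (!PySem.Set.contains vis v && edgeA data u v) = false) :
    (goA data u v vis mt).val = (goA data u (v + 1) vis mt).val := by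
  rw [goA.eq_def, dif_neg hv, dif_neg (show ¬ _ = true by rw [hc]; simp)]

theorem goA_guard (data : List (List Int)) (u : Int) (v : Nat) (vis : PySem.Set Nat)
    (mt : List Int) (hv : ¬ data.length ≤ v)
    (hc : (!PySem.Set.contains vis v && edgeA data u v) = true)
    (hL : ¬ vis.length < data.length) :
    (goA data u v vis mt).val = (false, vis, mt) := by
  rw [goA.eq_def, dif_neg hv, dif_pos hc, dif_neg hL]

theorem goA_succ (data : List (List Int)) (u : Int) (v : Nat) (vis : PySem.Set Nat)
    (mt : List Int) (hv : ¬ data.length ≤ v)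
    (hc : (!PySem.Set.contains vis v && edgeA data u v) = true)
    (hL : vis.length < data.length) (hm : mt.getD v (-1) = -1) :
    (goA data u v vis mt).val = (true, PySem.Set.add vis v, mt.set v u) := by
  rw [goA.eq_def, dif_neg hv, dif_pos hc, dif_pos hL, if_pos hm]

theorem goA_push_t (data : List (List Int)) (u : Int) (v : Nat) (vis : PySem.Set Nat)
    (mt : List Int) (hv : ¬ data.length ≤ v)
    (hc : (!PySem.Set.contains vis v && edgeA data u v) = true)
    (hL : vis.length < data.length) (hm : ¬ mt.getD v (-1) = -1)
    (hr : (goA data (mt.getD v (-1)) 0 (PySem.Set.add vis v) mt).val.1 = true) :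
    (goA data u v vis mt).val =
      (true, (goA data (mt.getD v (-1)) 0 (PySem.Set.add vis v) mt).val.2.1,
        ((goA data (mt.getD v (-1)) 0 (PySem.Set.add vis v) mt).val.2.2).set v u) := by
  rw [goA.eq_def, dif_neg hv, dif_pos hc, dif_pos hL, if_neg hm]
  rcases hgo : goA data (mt.getD v (-1)) 0 (PySem.Set.add vis v) mt with ⟨⟨ok, vis2, mt2⟩, hprf⟩
  rw [hgo] at hr
  simp at hr
  subst hr
  rfl

theorem goA_push_f (data : List (List Int)) (u : Int) (v : Nat) (vis : PySem.Set Nat)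
    (mt : List Int) (hv : ¬ data.length ≤ v)
    (hc : (!PySem.Set.contains vis v && edgeA data u v) = true)
    (hL : vis.length < data.length) (hm : ¬ mt.getD v (-1) = -1)
    (hr : (goA data (mt.getD v (-1)) 0 (PySem.Set.add vis v) mt).val.1 = false) :
    (goA data u v vis mt).val =
      (goA data u (v + 1) (goA data (mt.getD v (-1)) 0 (PySem.Set.add vis v) mt).val.2.1
        (goA data (mt.getD v (-1)) 0 (PySem.Set.add vis v) mt).val.2.2).val := by
  rw [goA.eq_def, dif_neg hv, dif_pos hc, dif_pos hL, if_neg hm]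
  rcases hgo : goA data (mt.getD v (-1)) 0 (PySem.Set.add vis v) mt with ⟨⟨ok, vis2, mt2⟩, hprf⟩
  rw [hgo] at hr
  simp at hr
  subst hr
  rcases hgo2 : goA data u (v + 1) vis2 mt2 with ⟨r2, hprf2⟩
  dsimp only
  rw [hgo2]

-- one-step equations for runB
theorem runB_pop (n : Nat) (adj : List (List Bool)) (w : Int) (v : Nat)
    (rest : List (Int × Nat)) (vis : PySem.Set Nat) (mt : List Int) (hnv : n ≤ v) :
    runB n adj ((w, v) :: rest) vis mt =
      (match rest with
       | [] => (false, vis, mt)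
       | (pw, pv) :: rest' => runB n adj ((pw, pv + 1) :: rest') vis mt) := by
  rw [runB.eq_def]
  dsimp only
  rw [dif_pos hnv]

theorem runB_skip (n : Nat) (adj : List (List Bool)) (w : Int) (v : Nat)
    (rest : List (Int × Nat)) (vis : PySem.Set Nat) (mt : List Int)
    (hnv : ¬ n ≤ v) (hsk : (PySem.Set.contains vis v || !lookB adj w v) = true) :
    runB n adj ((w, v) :: rest) vis mt = runB n adj ((w, v + 1) :: rest) vis mt := by
  rw [runB.eq_def]
  dsimp only
  rw [dif_neg hnv, dif_pos hsk]

theorem runB_succ (n : Nat) (adj : List (List Bool)) (w : Int) (v : Nat)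
    (rest : List (Int × Nat)) (vis : PySem.Set Nat) (mt : List Int)
    (hnv : ¬ n ≤ v) (hsk : (PySem.Set.contains vis v || !lookB adj w v) = false)
    (hL : vis.length < n) (hm : mt.getD v (-1) = -1) :
    runB n adj ((w, v) :: rest) vis mt =
      (true, PySem.Set.add vis v, ((w, v) :: rest).foldl (fun m p => m.set p.2 p.1) mt) := by
  rw [runB.eq_def]
  dsimp only
  rw [dif_neg hnv, dif_neg (show ¬ _ = true by rw [hsk]; simp), dif_pos hL, if_pos hm]

theorem runB_push (n : Nat) (adj : List (List Bool)) (w : Int) (v : Nat)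
    (rest : List (Int × Nat)) (vis : PySem.Set Nat) (mt : List Int)
    (hnv : ¬ n ≤ v) (hsk : (PySem.Set.contains vis v || !lookB adj w v) = false)
    (hL : vis.length < n) (hm : ¬ mt.getD v (-1) = -1) :
    runB n adj ((w, v) :: rest) vis mt =
      runB n adj ((mt.getD v (-1), 0) :: (w, v) :: rest) (PySem.Set.add vis v) mt := by
  rw [runB.eq_def]
  dsimp only
  rw [dif_neg hnv, dif_neg (show ¬ _ = true by rw [hsk]; simp), dif_pos hL, if_neg hm]

theorem runB_guard (n : Nat) (adj : List (List Bool)) (w : Int) (v : Nat)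
    (rest : List (Int × Nat)) (vis : PySem.Set Nat) (mt : List Int)
    (hnv : ¬ n ≤ v) (hsk : (PySem.Set.contains vis v || !lookB adj w v) = false)
    (hL : ¬ vis.length < n) :
    runB n adj ((w, v) :: rest) vis mt = runB n adj ((w, n) :: rest) vis mt := by
  rw [runB.eq_def]
  dsimp only
  rw [dif_neg hnv, dif_neg (show ¬ _ = true by rw [hsk]; simp), dif_neg hL]

-- the simulation: running B's stack machine on a frame (u, v) over `rest`
-- computes A's recursive dfs and feeds its result to the continuation `rest`
theorem sim (data : List (List Int)) (hpre : Pre_min_charts data) :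
    ∀ (k₁ k₂ : Nat) (u : Int) (v : Nat) (vis : PySem.Set Nat) (mt : List Int)
      (rest : List (Int × Nat)),
      data.length - vis.length ≤ k₁ → data.length - v ≤ k₂ →
      runB data.length (adjB data) ((u, v) :: rest) vis mt
        = contA data rest (goA data u v vis mt).val := by
  intro k₁
  induction k₁ with
  | zero =>
    intro k₂
    induction k₂ with
    | zero =>
      intro u v vis mt rest h1 h2
      have hv : data.length ≤ v := by omega
      rw [goA_exit data u v vis mt hv, runB_pop data.length (adjB data) u v rest vis mt hv]
      cases rest with
      | nil => simp [contA]
      | cons p rest' => cases p with | mk pw pv => simp [contA]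
    | succ k₂ ih₂ =>
      intro u v vis mt rest h1 h2
      by_cases hv : data.length ≤ v
      · rw [goA_exit data u v vis mt hv, runB_pop data.length (adjB data) u v rest vis mt hv]
        cases rest with
        | nil => simp [contA]
        | cons p rest' => cases p with | mk pw pv => simp [contA]
      · have hlk := look_eq data hpre u v (by omega)
        by_cases hc : (!PySem.Set.contains vis v && edgeA data u v) = true
        · -- fresh and compatible; but the visited budget is exhausted: both guards fail
          have hsk : (PySem.Set.contains vis v || !lookB (adjB data) u v) = false := by
            rw [hlk]; revert hc
            cases PySem.Set.contains vis v <;> cases edgeA data u v <;> simp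
          have hL : ¬ vis.length < data.length := by omega
          rw [runB_guard data.length (adjB data) u v rest vis mt hv hsk hL,
            runB_pop data.length (adjB data) u data.length rest vis mt le_rfl,
            goA_guard data u v vis mt hv hc hL]
          cases rest with
          | nil => simp [contA]
          | cons p rest' => cases p with | mk pw pv => simp [contA]
        · have hcf : (!PySem.Set.contains vis v && edgeA data u v) = false := by
            revert hc; cases (!PySem.Set.contains vis v && edgeA data u v) <;> simp
          have hsk : (PySem.Set.contains vis v || !lookB (adjB data) u v) = true := by
            rw [hlk]; revert hcf
            cases PySem.Set.contains vis v <;> cases edgeA data u v <;> simp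
          rw [runB_skip data.length (adjB data) u v rest vis mt hv hsk,
            goA_skip data u v vis mt hv hcf]
          exact ih₂ u (v + 1) vis mt rest h1 (by omega)
  | succ k₁ ih₁ =>
    intro k₂
    induction k₂ with
    | zero =>
      intro u v vis mt rest h1 h2
      have hv : data.length ≤ v := by omega
      rw [goA_exit data u v vis mt hv, runB_pop data.length (adjB data) u v rest vis mt hv]
      cases rest with
      | nil => simp [contA]
      | cons p rest' => cases p with | mk pw pv => simp [contA]
    | succ k₂ ih₂ =>
      intro u v vis mt rest h1 h2
      by_cases hv : data.length ≤ v
      · rw [goA_exit data u v vis mt hv, runB_pop data.length (adjB data) u v rest vis mt hv]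
        cases rest with
        | nil => simp [contA]
        | cons p rest' => cases p with | mk pw pv => simp [contA]
      · have hlk := look_eq data hpre u v (by omega)
        by_cases hc : (!PySem.Set.contains vis v && edgeA data u v) = true
        · have hsk : (PySem.Set.contains vis v || !lookB (adjB data) u v) = false := by
            rw [hlk]; revert hc
            cases PySem.Set.contains vis v <;> cases edgeA data u v <;> simp
          have hnm : v ∉ vis := by
            have := hc; simp at this; exact this.1
          have hlen := pvSetAddLen vis hnm
          by_cases hL : vis.length < data.length
          · by_cases hm : mt.getD v (-1) = -1
            · -- direct success
              rw [runB_succ data.length (adjB data) u v rest vis mt hv hsk hL hm,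
                goA_succ data u v vis mt hv hc hL hm]
              simp [contA, List.foldl_cons]
            · -- push the matched left vertex
              rw [runB_push data.length (adjB data) u v rest vis mt hv hsk hL hm]
              have hrec := ih₁ data.length (mt.getD v (-1)) 0 (PySem.Set.add vis v) mt
                ((u, v) :: rest) (by omega) (by omega)
              rw [hrec]
              set r := (goA data (mt.getD v (-1)) 0 (PySem.Set.add vis v) mt) with hrdef
              cases hr1 : r.val.1
              · -- inner search failed: the parent frame advances
                have hstep : contA data ((u, v) :: rest) r.val
                    = runB data.length (adjB data) ((u, v + 1) :: rest) r.val.2.1 r.val.2.2 := by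
                  unfold contA; rw [hr1]; simp
                rw [hstep]
                have hcont := ih₁ data.length u (v + 1) r.val.2.1 r.val.2.2 rest
                  (by have := r.property; omega) (by omega)
                rw [hcont, goA_push_f data u v vis mt hv hc hL hm hr1, hrdef]
              · -- inner search succeeded: assign along the stack
                have hstep : contA data ((u, v) :: rest) r.val
                    = (true, r.val.2.1, rest.foldl (fun m p => m.set p.2 p.1) (r.val.2.2.set v u)) := by
                  unfold contA; rw [hr1]; simp [List.foldl_cons]
                rw [hstep, goA_push_t data u v vis mt hv hc hL hm hr1, ← hrdef]
                simp [contA]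
          · rw [runB_guard data.length (adjB data) u v rest vis mt hv hsk hL,
              runB_pop data.length (adjB data) u data.length rest vis mt le_rfl,
              goA_guard data u v vis mt hv hc hL]
            cases rest with
            | nil => simp [contA]
            | cons p rest' => cases p with | mk pw pv => simp [contA]
        · have hcf : (!PySem.Set.contains vis v && edgeA data u v) = false := by
            revert hc; cases (!PySem.Set.contains vis v && edgeA data u v) <;> simp
          have hsk : (PySem.Set.contains vis v || !lookB (adjB data) u v) = true := by
            rw [hlk]; revert hcf
            cases PySem.Set.contains vis v <;> cases edgeA data u v <;> simp
          rw [runB_skip data.length (adjB data) u v rest vis mt hv hsk,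
            goA_skip data u v vis mt hv hcf]
          exact ih₂ u (v + 1) vis mt rest h1 (by omega)

-- on an empty continuation B's machine returns exactly A's dfs result
theorem sim_top (data : List (List Int)) (hpre : Pre_min_charts data)
    (u : Int) (mt : List Int) :
    runB data.length (adjB data) [(u, 0)] PySem.Set.empty mt
      = (goA data u 0 PySem.Set.empty mt).val := by
  have := sim data hpre data.length data.length u 0 PySem.Set.empty mt []
    (by simp [PySem.Set.empty]) (by omega)
  rw [this]
  set r := (goA data u 0 PySem.Set.empty mt).val with hr
  cases hr1 : r.1
  · simp [contA, hr1]
    rw [← hr1]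
  · simp [contA, hr1]
    rw [← hr1]

-- the fuel given to A's port never runs out: goAF computes goA
theorem goAF_eq (data : List (List Int)) :
    ∀ (k₁ k₂ : Nat) (u : Int) (v : Nat) (vis : PySem.Set Nat) (mt : List Int) (fuel : Nat),
      data.length - vis.length ≤ k₁ → data.length - v ≤ k₂ →
      (data.length + 1 - vis.length) * (data.length + 2) + (data.length - v) + 1 ≤ fuel →
      goAF data fuel u v vis mt = (goA data u v vis mt).val := by
  intro k₁
  induction k₁ with
  | zero =>
    intro k₂
    induction k₂ with
    | zero =>
      intro u v vis mt fuel h1 h2 hf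
      have hv : data.length ≤ v := by omega
      obtain ⟨f, rfl⟩ : ∃ f, fuel = f + 1 := ⟨fuel - 1, by omega⟩
      rw [goA_exit data u v vis mt hv]
      simp only [goAF]
      rw [if_pos hv]
    | succ k₂ ih₂ =>
      intro u v vis mt fuel h1 h2 hf
      obtain ⟨f, rfl⟩ : ∃ f, fuel = f + 1 := ⟨fuel - 1, by omega⟩
      by_cases hv : data.length ≤ v
      · rw [goA_exit data u v vis mt hv]; simp only [goAF]; rw [if_pos hv]
      · by_cases hc : (!PySem.Set.contains vis v && edgeA data u v) = true
        · have hL : ¬ vis.length < data.length := by omega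
          rw [goA_guard data u v vis mt hv hc hL]
          simp only [goAF]
          rw [if_neg hv, if_pos hc, if_neg hL]
        · have hcf : (!PySem.Set.contains vis v && edgeA data u v) = false := by
            revert hc; cases (!PySem.Set.contains vis v && edgeA data u v) <;> simp
          rw [goA_skip data u v vis mt hv hcf]
          simp only [goAF]
          rw [if_neg hv, if_neg (show ¬ _ = true by rw [hcf]; simp)]
          exact ih₂ u (v + 1) vis mt f h1 (by omega) (by omega)
  | succ k₁ ih₁ =>
    intro k₂
    induction k₂ with
    | zero =>
      intro u v vis mt fuel h1 h2 hf
      have hv : data.length ≤ v := by omega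
      obtain ⟨f, rfl⟩ : ∃ f, fuel = f + 1 := ⟨fuel - 1, by omega⟩
      rw [goA_exit data u v vis mt hv]
      simp only [goAF]
      rw [if_pos hv]
    | succ k₂ ih₂ =>
      intro u v vis mt fuel h1 h2 hf
      obtain ⟨f, rfl⟩ : ∃ f, fuel = f + 1 := ⟨fuel - 1, by omega⟩
      by_cases hv : data.length ≤ v
      · rw [goA_exit data u v vis mt hv]; simp only [goAF]; rw [if_pos hv]
      · by_cases hc : (!PySem.Set.contains vis v && edgeA data u v) = true
        · have hnm : v ∉ vis := by
            have := hc; simp at this; exact this.1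
          have hlen := pvSetAddLen vis hnm
          by_cases hL : vis.length < data.length
          · have hmul : (data.length + 1 - (vis.length + 1)) * (data.length + 2) + (data.length + 2)
                = (data.length + 1 - vis.length) * (data.length + 2) := by
              have hstep : data.length + 1 - vis.length
                  = (data.length + 1 - (vis.length + 1)) + 1 := by omega
              rw [hstep, Nat.succ_mul]
            by_cases hm : mt.getD v (-1) = -1
            · rw [goA_succ data u v vis mt hv hc hL hm]
              simp only [goAF]
              rw [if_neg hv, if_pos hc, if_pos hL, if_pos hm]
            · have hrec := ih₁ data.length (mt.getD v (-1)) 0 (PySem.Set.add vis v) mt f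
                (by omega) (by omega) (by rw [hlen]; omega)
              have hmono := (goA data (mt.getD v (-1)) 0 (PySem.Set.add vis v) mt).property
              cases hr1 : (goA data (mt.getD v (-1)) 0 (PySem.Set.add vis v) mt).val.1
              · rw [goA_push_f data u v vis mt hv hc hL hm hr1]
                simp only [goAF]
                rw [if_neg hv, if_pos hc, if_pos hL, if_neg hm]
                simp only [hrec, hr1, if_false, Bool.false_eq_true]
                have hmul2 := Nat.mul_le_mul_right (k := data.length + 2)
                  (show data.length + 1 - (goA data (mt.getD v (-1)) 0 (PySem.Set.add vis v) mt).val.2.1.length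
                      ≤ data.length + 1 - (vis.length + 1) by
                    rw [← hlen]; omega)
                exact ih₁ data.length u (v + 1)
                  (goA data (mt.getD v (-1)) 0 (PySem.Set.add vis v) mt).val.2.1
                  (goA data (mt.getD v (-1)) 0 (PySem.Set.add vis v) mt).val.2.2 f
                  (by omega) (by omega) (by omega)
              · rw [goA_push_t data u v vis mt hv hc hL hm hr1]
                simp only [goAF]
                rw [if_neg hv, if_pos hc, if_pos hL, if_neg hm]
                simp only [hrec, hr1, if_true]
          · rw [goA_guard data u v vis mt hv hc hL]
            simp only [goAF]
            rw [if_neg hv, if_pos hc, if_neg hL]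
        · have hcf : (!PySem.Set.contains vis v && edgeA data u v) = false := by
            revert hc; cases (!PySem.Set.contains vis v && edgeA data u v) <;> simp
          rw [goA_skip data u v vis mt hv hcf]
          simp only [goAF]
          rw [if_neg hv, if_neg (show ¬ _ = true by rw [hcf]; simp)]
          exact ih₂ u (v + 1) vis mt f h1 (by omega) (by omega)

-- the fuel given to B's port never runs out: runBF computes runB
theorem runBF_eq (n : Nat) (adj : List (List Bool)) :
    ∀ (fuel : Nat) (stack : List (Int × Nat)) (vis : PySem.Set Nat) (mt : List Int),
      (n + 1 - vis.length) * (n + 3) + ((stack.map (fun p => n + 1 - p.2)).sum)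
          + stack.length + 1 ≤ fuel →
      runBF n adj fuel stack vis mt = runB n adj stack vis mt := by
  intro fuel
  induction fuel with
  | zero => intro stack vis mt h; omega
  | succ f ih =>
    intro stack vis mt h
    match stack with
    | [] => simp only [runBF, runB_nil]
    | (w, v) :: rest =>
      simp only [List.map_cons, List.sum_cons, List.length_cons] at h
      by_cases hnv : n ≤ v
      · rw [runB_pop n adj w v rest vis mt hnv]
        simp only [runBF]
        rw [if_pos hnv]
        match rest with
        | [] => simp
        | (pw, pv) :: rest' =>
          simp only
          exact ih ((pw, pv + 1) :: rest') vis mt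
            (by simp only [List.map_cons, List.sum_cons, List.length_cons] at h ⊢; omega)
      · by_cases hsk : (PySem.Set.contains vis v || !lookB adj w v) = true
        · rw [runB_skip n adj w v rest vis mt hnv hsk]
          simp only [runBF]
          rw [if_neg hnv, if_pos hsk]
          exact ih ((w, v + 1) :: rest) vis mt
            (by simp only [List.map_cons, List.sum_cons, List.length_cons]; omega)
        · have hskf : (PySem.Set.contains vis v || !lookB adj w v) = false := by
            revert hsk; cases (PySem.Set.contains vis v || !lookB adj w v) <;> simp
          have hnm : v ∉ vis := by
            have := hskf; simp at this; exact this.1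
          have hlen := pvSetAddLen vis hnm
          by_cases hL : vis.length < n
          · have hmul : (n + 1 - (vis.length + 1)) * (n + 3) + (n + 3)
                = (n + 1 - vis.length) * (n + 3) := by
              have hstep : n + 1 - vis.length = (n + 1 - (vis.length + 1)) + 1 := by omega
              rw [hstep, Nat.succ_mul]
            by_cases hm : mt.getD v (-1) = -1
            · rw [runB_succ n adj w v rest vis mt hnv hskf hL hm]
              simp only [runBF]
              rw [if_neg hnv, if_neg (show ¬ _ = true by rw [hskf]; simp), if_pos hL, if_pos hm]
            · rw [runB_push n adj w v rest vis mt hnv hskf hL hm]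
              simp only [runBF]
              rw [if_neg hnv, if_neg (show ¬ _ = true by rw [hskf]; simp), if_pos hL, if_neg hm]
              exact ih ((mt.getD v (-1), 0) :: (w, v) :: rest) (PySem.Set.add vis v) mt
                (by simp only [List.map_cons, List.sum_cons, List.length_cons]
                    rw [hlen]; omega)
          · rw [runB_guard n adj w v rest vis mt hnv hskf hL]
            simp only [runBF]
            rw [if_neg hnv, if_neg (show ¬ _ = true by rw [hskf]; simp), if_neg hL]
            exact ih ((w, n) :: rest) vis mt
              (by simp only [List.map_cons, List.sum_cons, List.length_cons]; omega)

-- ===== VERDICT (by name: the statement is the Claim_ definition above) =====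
theorem min_charts_spec : Claim_equal_min_charts := by
  unfold Claim_equal_min_charts Spec_min_charts
  intro data _hdom hpre
  unfold min_charts min_charts_alt
  by_cases hn : data.length ≤ 1
  · simp [hn]
  · simp only [hn, if_false]
    have hA : ∀ (st : List Int × Int) (u : Int),
        goAF data ((data.length + 1) * (data.length + 3)) u 0 PySem.Set.empty st.1
          = (goA data u 0 PySem.Set.empty st.1).val := by
      intro st u
      refine goAF_eq data data.length data.length u 0 PySem.Set.empty st.1 _
        (by simp [PySem.Set.empty]) (by omega) ?_
      have hring : (data.length + 1) * (data.length + 3)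
          = (data.length + 1) * (data.length + 2) + (data.length + 1) := by ring
      simp [PySem.Set.empty, hring]
    have hB : ∀ (st : List Int × Int) (u : Int),
        runBF data.length (adjB data) ((data.length + 2) * (data.length + 3))
            [(u, 0)] PySem.Set.empty st.1
          = runB data.length (adjB data) [(u, 0)] PySem.Set.empty st.1 := by
      intro st u
      refine runBF_eq data.length (adjB data) _ [(u, 0)] PySem.Set.empty st.1 ?_
      have hring : (data.length + 2) * (data.length + 3)
          = (data.length + 1) * (data.length + 3) + (data.length + 3) := by ring
      simp [PySem.Set.empty, hring]
      omega
    have hstep : (fun (st : List Int × Int) (u : Int) =>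
          let r := goAF data ((data.length + 1) * (data.length + 3)) u 0 PySem.Set.empty st.1
          ((r.2.2 : List Int), if r.1 then st.2 + 1 else st.2))
        = (fun (st : List Int × Int) (u : Int) =>
          let r := runBF data.length (adjB data) ((data.length + 2) * (data.length + 3))
            [(u, 0)] PySem.Set.empty st.1
          (r.2.2, if r.1 then st.2 + 1 else st.2)) := by
      funext st u
      simp only [hA, hB, sim_top data hpre u st.1]
    rw [hstep]
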